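-- pv_equiv track=rewrite | github.com/RikVN/Neural_DRS | src/drs_jury.py | get_idv_differences
-- ===== SOURCE A (Python) =====
-- def get_idv_differences(avg1, avg2):
--     '''Return number of times model 1 > model 2, and ties, and other way around'''
--     higher, ties, lower = 0, 0, 0
--     for sc1, sc2 in zip(avg1, avg2):
--         if sc1 > sc2:
--             higher += 1
--         elif sc1 == sc2:
--             ties += 1
--         else:
--             lower += 1
--     return higher, ties, lower
-- ===== SOURCE B (Python) =====
-- def get_idv_differences(avg1, avg2):
--     '''Return number of times model 1 > model 2, and ties, and other way around'''
--     pairs = list(zip(avg1, avg2))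
--     higher = sum(1 for a, b in pairs if a > b)
--     ties = sum(1 for a, b in pairs if a == b)
--     return higher, ties, len(pairs) - higher - ties
-- ===== Notes on version B (the rewrite author's own statement) =====
-- stated objective: idiomatic
-- what changed: Replaces the single loop with triple mutable counters by two declarative countP passes over the zipped pairs, deriving lower arithmetically as total - higher - ties.
import Mathlib
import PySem

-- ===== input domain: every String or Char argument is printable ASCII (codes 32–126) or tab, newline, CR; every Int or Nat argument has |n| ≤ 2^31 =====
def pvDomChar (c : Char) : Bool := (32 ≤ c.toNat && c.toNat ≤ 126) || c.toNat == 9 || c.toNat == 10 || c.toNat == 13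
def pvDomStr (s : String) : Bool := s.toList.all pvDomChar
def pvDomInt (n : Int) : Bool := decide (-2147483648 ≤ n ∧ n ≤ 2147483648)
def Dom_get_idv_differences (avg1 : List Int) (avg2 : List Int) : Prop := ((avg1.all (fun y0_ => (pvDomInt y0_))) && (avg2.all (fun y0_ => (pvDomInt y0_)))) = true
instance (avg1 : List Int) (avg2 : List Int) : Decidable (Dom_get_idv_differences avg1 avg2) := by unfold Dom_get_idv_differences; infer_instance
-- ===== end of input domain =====

-- B counts 'higher' and 'ties' in two declarative passes and derives 'lower' as the complement; same return value, idiomatic decomposition.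

-- ===== PORT A =====
-- single loop over zip, three accumulators, branches in A's order
def get_idv_differences (avg1 : List Int) (avg2 : List Int) : Int × Int × Int :=
  (List.zip avg1 avg2).foldl
    (fun (s : Int × Int × Int) p =>
      if p.1 > p.2 then (s.1 + 1, s.2.1, s.2.2)
      else if p.1 = p.2 then (s.1, s.2.1 + 1, s.2.2)
      else (s.1, s.2.1, s.2.2 + 1))
    (0, 0, 0)

-- ===== PORT B =====
def get_idv_differences_alt (avg1 : List Int) (avg2 : List Int) : Int × Int × Int :=
  let pairs := List.zip avg1 avg2
  let higher : Int := (pairs.countP (fun p => p.1 > p.2) : Nat)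
  let ties : Int := (pairs.countP (fun p => p.1 = p.2) : Nat)
  (higher, ties, (pairs.length : Int) - higher - ties)

-- ===== PRECONDITION & SPEC =====
def Spec_get_idv_differences (avg1 : List Int) (avg2 : List Int) (out : Int × Int × Int) : Prop := out = get_idv_differences_alt avg1 avg2
instance (avg1 : List Int) (avg2 : List Int) (out : Int × Int × Int) : Decidable (Spec_get_idv_differences avg1 avg2 out) := by unfold Spec_get_idv_differences; infer_instance

-- ===== CLAIM (what is proved, stated in full; the proofs are below) =====
def Claim_equal_get_idv_differences : Prop := ∀ (avg1 : List Int) (avg2 : List Int), Dom_get_idv_differences avg1 avg2 → Spec_get_idv_differences avg1 avg2 (get_idv_differences avg1 avg2)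

-- ===== LEMMAS AND PROOFS =====

theorem pv_fold_counts (l : List (Int × Int)) (h t w : Int) :
    l.foldl
      (fun (s : Int × Int × Int) p =>
        if p.1 > p.2 then (s.1 + 1, s.2.1, s.2.2)
        else if p.1 = p.2 then (s.1, s.2.1 + 1, s.2.2)
        else (s.1, s.2.1, s.2.2 + 1))
      (h, t, w)
    = (h + (l.countP (fun p => p.1 > p.2) : Nat),
       t + (l.countP (fun p => p.1 = p.2) : Nat),
       w + (l.length : Int) - (l.countP (fun p => p.1 > p.2) : Nat) - (l.countP (fun p => p.1 = p.2) : Nat)) := by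
  induction l generalizing h t w with
  | nil => simp
  | cons p rest ih =>
    simp only [List.foldl_cons, List.countP_cons, List.length_cons]
    by_cases hgt : p.1 > p.2
    · simp only [if_pos hgt, ih]
      have hne : ¬ p.1 = p.2 := by omega
      simp [hgt, hne]
      refine ⟨by ring, by ring⟩
    · simp only [if_neg hgt]
      by_cases heq : p.1 = p.2
      · simp only [if_pos heq, ih]
        simp [heq]
        refine ⟨by ring, by ring⟩
      · simp only [if_neg heq, ih]
        have hlt : ¬ p.2 < p.1 := hgt
        simp [heq, hlt]
        ring

-- ===== VERDICT (by name: the statement is the Claim_ definition above) =====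
theorem get_idv_differences_spec : Claim_equal_get_idv_differences := by
  intro avg1 avg2 _
  unfold Spec_get_idv_differences get_idv_differences get_idv_differences_alt
  rw [pv_fold_counts]
  simp
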